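-- pv_equiv track=rewrite | github.com/EvgenyB1/misc_utils | py_utils/t9.py | key_combo
-- ===== SOURCE A (Python) =====
-- def key_combo(char):
--     """ Converts char to T9 mobile keypad presses
--     >>>t9.key_combo('a')
--     2
--     >>>t9.key_combo('B')
--     22
--     """
--     if len(char) > 1:
--         raise ValueError("Function expects single char")
--     keypad = {"2": ["A", "B", "C"], "3": ["D", "E", "F"],
--         "4": ["G", "H", "I"], "5": ["J", "K", "L"],
--         "6": ["M", "N", "O"], "7": ["P", "Q", "R", "S"],
--         "8": ["T", "U", "V"], "9": ["W", "X", "Y", "Z"],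
--         "0": [" "]}
--     char = char.upper()
--     for key in keypad:
--         if char in keypad[key]:
--             return key * (keypad[key].index(char) + 1)
-- ===== SOURCE B (Python) =====
-- # B: arithmetic closed form on the character code -- no keypad table at all.
-- def key_combo(char):
--     if len(char) > 1:
--         raise ValueError("Function expects single char")
--     c = char.upper()
--     if c == " ":
--         return "0"
--     if "A" <= c <= "Z":
--         idx = ord(c) - ord("A")
--         if idx < 15:            # A..O: uniform groups of 3 on keys 2..6
--             key, pos = 2 + idx // 3, idx % 3 + 1
--         elif idx < 19:          # PQRS on key 7
--             key, pos = 7, idx - 14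
--         elif idx < 22:          # TUV on key 8
--             key, pos = 8, idx - 18
--         else:                   # WXYZ on key 9
--             key, pos = 9, idx - 21
--         return str(key) * pos
--     return None
-- ===== Notes on version B (the rewrite author's own statement) =====
-- stated objective: alternative
-- what changed: A scans a keypad dict of letter lists per call, using membership and .index; B has no table at all: it computes the key digit and press count arithmetically from the character code (uniform groups of 3 for A..O, explicit offsets for PQRS/TUV/WXYZ, space -> '0'), keeping the same len>1 ValueError guard.
import Mathlib
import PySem

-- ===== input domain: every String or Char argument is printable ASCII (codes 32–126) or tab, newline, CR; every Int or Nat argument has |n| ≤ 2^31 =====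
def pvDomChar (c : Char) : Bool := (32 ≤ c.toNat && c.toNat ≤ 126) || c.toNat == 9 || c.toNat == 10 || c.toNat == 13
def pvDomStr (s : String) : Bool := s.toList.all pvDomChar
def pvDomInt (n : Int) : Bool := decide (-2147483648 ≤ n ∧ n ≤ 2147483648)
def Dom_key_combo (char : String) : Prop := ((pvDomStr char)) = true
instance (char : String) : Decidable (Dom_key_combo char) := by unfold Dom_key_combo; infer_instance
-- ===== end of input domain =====

-- B replaces A's per-call scan of the keypad table by closed-form arithmetic on the
-- character code (no table); return value only — both raise on len > 1, excluded by Pre_.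

-- ===== PORT A =====
def pvKeypadA : List (String × List String) :=
  [("2", ["A", "B", "C"]), ("3", ["D", "E", "F"]),
   ("4", ["G", "H", "I"]), ("5", ["J", "K", "L"]),
   ("6", ["M", "N", "O"]), ("7", ["P", "Q", "R", "S"]),
   ("8", ["T", "U", "V"]), ("9", ["W", "X", "Y", "Z"]),
   ("0", [" "])]

-- "for key in keypad: if char in keypad[key]: return key * (keypad[key].index(char) + 1)"
def pvLoopA (ch : String) : List (String × List String) → Option String
  | [] => none
  | (k, letters) :: rest =>
    if letters.contains ch then
      match PySem.List.index? letters ch with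
      | some i => some (String.ofList (PySem.List.pyRepeat k.toList ((i : Int) + 1)))
      | none => none
    else pvLoopA ch rest

def key_combo (char : String) : Option String :=
  if PySem.Str.len char > 1 then none  -- Python raises ValueError here; excluded by Pre_
  else pvLoopA (PySem.Str.upper char) pvKeypadA

-- ===== PORT B =====
-- Python's lexicographic string <= (code-point order; exact for ASCII strings)
def pvStrLe : List Char → List Char → Bool
  | [], _ => true
  | _ :: _, [] => false
  | a :: as, b :: bs =>
    if a.toNat < b.toNat then true
    else if b.toNat < a.toNat then false
    else pvStrLe as bs

-- the single character's code; Python's ord(c) is only reached when c is one char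
def pvOrdB (c : String) : Int :=
  match c.toList with
  | [ch] => (ch.toNat : Int)
  | _ => 0

def key_combo_alt (char : String) : Option String :=
  if PySem.Str.len char > 1 then none  -- Python raises ValueError here; excluded by Pre_
  else
    let c := PySem.Str.upper char
    if c.toList = [' '] then some "0"
    else if pvStrLe ['A'] c.toList ∧ pvStrLe c.toList ['Z'] then
      let idx : Int := pvOrdB c - 65
      let kp : Int × Int :=
        if idx < 15 then (2 + PySem.Int.floordiv idx 3, PySem.Int.mod idx 3 + 1)
        else if idx < 19 then (7, idx - 14)
        else if idx < 22 then (8, idx - 18)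
        else (9, idx - 21)
      some (String.ofList (PySem.List.pyRepeat (PySem.Int.toStr kp.1).toList kp.2))
    else none

-- ===== PRECONDITION & SPEC =====
-- Pre_ excludes exactly the inputs of length > 1, on which both A and B raise ValueError.
def Pre_key_combo (char : String) : Prop := PySem.Str.len char ≤ 1
instance (char : String) : Decidable (Pre_key_combo char) := by unfold Pre_key_combo; infer_instance
def pvWitness_key_combo : String := "a"

def Spec_key_combo (char : String) (out : Option String) : Prop := out = key_combo_alt char
instance (char : String) (out : Option String) : Decidable (Spec_key_combo char out) := by unfold Spec_key_combo; infer_instance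

-- ===== CLAIM =====
def Claim_equal_key_combo : Prop := ∀ (char : String), Dom_key_combo char → Pre_key_combo char → Spec_key_combo char (key_combo char)

-- ===== LEMMAS AND PROOFS =====

set_option maxRecDepth 8192 in
theorem pv_single_eq : ∀ n : Nat, n < 128 →
    key_combo (String.ofList [Char.ofNat n]) = key_combo_alt (String.ofList [Char.ofNat n]) := by
  decide

theorem pv_empty_eq : key_combo (String.ofList []) = key_combo_alt (String.ofList []) := by decide

-- ===== VERDICT =====
theorem key_combo_spec : Claim_equal_key_combo := by
  intro char hdom hpre
  unfold Spec_key_combo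
  have hc : char = String.ofList char.toList := String.ofList_toList.symm
  rcases hl : char.toList with _ | ⟨c, rest⟩
  · rw [hc, hl]; exact pv_empty_eq
  · rcases rest with _ | ⟨c2, r2⟩
    · have hdc : pvDomChar c = true := by
        have hall : ∀ x ∈ char.toList, pvDomChar x = true := by
          simpa [Dom_key_combo, pvDomStr, List.all_eq_true] using hdom
        exact hall c (by rw [hl]; exact List.mem_cons_self)
      have hn : c.toNat < 128 := by
        simp only [pvDomChar, Bool.or_eq_true, Bool.and_eq_true, decide_eq_true_eq,
          beq_iff_eq] at hdc
        omega
      have h := pv_single_eq c.toNat hn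
      rw [Char.ofNat_toNat] at h
      rw [hc, hl]; exact h
    · exfalso
      have hp := hpre
      simp only [Pre_key_combo, PySem.Str.len, hl, List.length_cons] at hp
      push_cast at hp
      omega
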